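-- pv_equiv track=rewrite | github.com/chaoyue-code/DataEngineeringPipeline | lambda/snowflake_extractor/watermark_manager.py | validate_referential_integrity
-- ===== SOURCE A (Python) =====
-- from typing import Dict, List, Any, Optional, Tuple
--
-- def validate_referential_integrity(data: List[Dict], reference_data: Dict[str, List],
--                                  foreign_keys: Dict[str, str]) -> Tuple[bool, List[str]]:
--     """
--     Validate referential integrity between datasets
--
--     Args:
--         data: Main dataset to validate
--         reference_data: Dictionary of reference datasets
--         foreign_keys: Mapping of foreign key columns to reference tables
--
--     Returns:
--         Tuple of (is_valid, list_of_errors)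
--     """
--     errors = []
--
--     for fk_column, ref_table in foreign_keys.items():
--         if ref_table not in reference_data:
--             errors.append(f"Reference table {ref_table} not found")
--             continue
--
--         # Create set of valid reference values
--         ref_values = set()
--         for ref_row in reference_data[ref_table]:
--             # Assume first column is the primary key
--             if ref_row:
--                 pk_value = list(ref_row.values())[0]
--                 ref_values.add(pk_value)
--
--         # Check foreign key values
--         invalid_count = 0
--         for row in data:
--             fk_value = row.get(fk_column)
--             if fk_value is not None and fk_value not in ref_values:
--                 invalid_count += 1
--
--         if invalid_count > 0:
--             errors.append(f"Column {fk_column} has {invalid_count} invalid references to {ref_table}")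
--
--     is_valid = len(errors) == 0
--     return is_valid, errors
-- ===== SOURCE B (Python) =====
-- def validate_referential_integrity(data, reference_data, foreign_keys):
--     """Loop-inverted variant: one data-major pass keeps a counter per foreign
--     key, instead of scanning the whole dataset once per foreign key."""
--     # Index of first-column primary-key sets, one per reference table.
--     pk = {}
--     for table, rows in reference_data.items():
--         s = set()
--         for row in rows:
--             if row:
--                 s.add(next(iter(row.values())))
--         pk[table] = s
--
--     items = list(foreign_keys.items())
--     # Data-major pass: each data row bumps the counters of the keys it violates.
--     counts = [0] * len(items)
--     for row in data:
--         counts = [c + (1 if t in pk and (v := row.get(fk)) is not None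
--                        and v not in pk[t] else 0)
--                   for (fk, t), c in zip(items, counts)]
--
--     # Assemble the errors in foreign-key order from the finished counters.
--     errors = []
--     for (fk, t), c in zip(items, counts):
--         if t not in pk:
--             errors.append(f"Reference table {t} not found")
--         elif c > 0:
--             errors.append(f"Column {fk} has {c} invalid references to {t}")
--     return len(errors) == 0, errors
-- ===== Notes on version B (the rewrite author's own statement) =====
-- stated objective: alternative
-- what changed: B inverts the loop nesting: instead of A's foreign-key-major scan that rebuilds the reference set and rescans the whole dataset for each foreign key, B makes one data-major pass in which each data row updates a vector of per-foreign-key invalid counters (against a primary-key index built once), and a final pass assembles the errors from the finished counters.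
import Mathlib
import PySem

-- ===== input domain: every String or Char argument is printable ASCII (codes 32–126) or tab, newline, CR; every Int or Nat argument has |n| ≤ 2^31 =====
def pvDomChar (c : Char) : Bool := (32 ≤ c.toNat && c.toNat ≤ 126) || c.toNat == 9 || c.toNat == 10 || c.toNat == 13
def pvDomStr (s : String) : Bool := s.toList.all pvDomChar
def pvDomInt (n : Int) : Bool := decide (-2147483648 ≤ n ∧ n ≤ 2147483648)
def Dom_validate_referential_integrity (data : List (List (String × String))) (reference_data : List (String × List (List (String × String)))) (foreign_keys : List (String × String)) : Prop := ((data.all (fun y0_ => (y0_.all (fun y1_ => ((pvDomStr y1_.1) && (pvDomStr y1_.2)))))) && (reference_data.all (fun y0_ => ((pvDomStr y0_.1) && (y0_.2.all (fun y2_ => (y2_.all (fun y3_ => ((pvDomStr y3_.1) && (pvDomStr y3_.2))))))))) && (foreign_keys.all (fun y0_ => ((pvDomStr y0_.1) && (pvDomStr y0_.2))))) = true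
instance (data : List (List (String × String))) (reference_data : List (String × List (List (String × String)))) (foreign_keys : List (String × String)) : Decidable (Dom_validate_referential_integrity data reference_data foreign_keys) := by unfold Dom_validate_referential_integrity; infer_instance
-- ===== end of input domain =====

-- B inverts the loop nesting: one data-major pass updates a per-foreign-key
-- counter vector, then errors are assembled from the counters (objective:
-- alternative traversal order; same return value).


-- ===== PORT A =====
-- Literal port of A: for each foreign key, rebuild the reference-value set and
-- count invalid rows; dict lookups are first-match on the association list.
def validate_referential_integrity (data : List (List (String × String))) (reference_data : List (String × List (List (String × String)))) (foreign_keys : List (String × String)) : Bool × List String :=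
  let errors : List String := foreign_keys.foldl (fun (errors : List String) fk =>
    match List.lookup fk.2 reference_data with
    | none => errors ++ ["Reference table " ++ fk.2 ++ " not found"]
    | some refRows =>
        -- set of valid reference values: first value() of each nonempty row
        let ref_values : PySem.Set String := refRows.foldl (fun s ref_row =>
          match ref_row.map Prod.snd with
          | [] => s
          | v :: _ => PySem.Set.add s v) PySem.Set.empty
        let invalid_count : Int := data.foldl (fun n row =>
          match List.lookup fk.1 row with
          | none => n
          | some v => if v ∈ ref_values then n else n + 1) 0
        if invalid_count > 0 then
          errors ++ ["Column " ++ fk.1 ++ " has " ++ PySem.Int.toStr invalid_count ++ " invalid references to " ++ fk.2]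
        else errors) []
  (errors.length == 0, errors)

-- ===== PORT B =====
-- B-side helpers (each mirrors one piece of Source B):
-- the primary-key set of one reference table (Source B's inner set-building loop)
def pvPkSet (rows : List (List (String × String))) : PySem.Set String :=
  rows.foldl (fun s row =>
    match row.map Prod.snd with
    | [] => s
    | v :: _ => PySem.Set.add s v) PySem.Set.empty

-- Source B's per-row counter update: counts[i] += 1 when row violates items[i]
-- (the index-wise list update is exactly a zipWith over items and counts)
def pvBump (pk : List (String × PySem.Set String)) (items : List (String × String)) (row : List (String × String)) (counts : List Int) : List Int :=
  List.zipWith (fun (fk : String × String) (c : Int) =>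
    match List.lookup fk.2 pk with
    | none => c
    | some pks =>
        match List.lookup fk.1 row with
        | none => c
        | some v => if PySem.Set.contains pks v then c else c + 1) items counts

-- Source B's final error-assembly loop over zip(items, counts)
def pvAssemble (pk : List (String × PySem.Set String)) (pairs : List ((String × String) × Int)) : List String :=
  pairs.foldl (fun errors pc =>
    match List.lookup pc.1.2 pk with
    | none => errors ++ ["Reference table " ++ pc.1.2 ++ " not found"]
    | some _ =>
        if (pc.2 : Int) > 0 then
          errors ++ ["Column " ++ pc.1.1 ++ " has " ++ PySem.Int.toStr pc.2 ++ " invalid references to " ++ pc.1.2]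
        else errors) []

def validate_referential_integrity_alt (data : List (List (String × String))) (reference_data : List (String × List (List (String × String)))) (foreign_keys : List (String × String)) : Bool × List String :=
  let pk : List (String × PySem.Set String) := reference_data.map (fun p => (p.1, pvPkSet p.2))
  let items := foreign_keys
  let counts : List Int := data.foldl (fun cs row => pvBump pk items row cs) (List.replicate items.length 0)
  let errors : List String := pvAssemble pk (items.zip counts)
  (errors.length == 0, errors)

-- ===== PRECONDITION & SPEC =====
def Spec_validate_referential_integrity (data : List (List (String × String))) (reference_data : List (String × List (List (String × String)))) (foreign_keys : List (String × String)) (out : Bool × List String) : Prop := out = validate_referential_integrity_alt data reference_data foreign_keys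
instance (data : List (List (String × String))) (reference_data : List (String × List (List (String × String)))) (foreign_keys : List (String × String)) (out : Bool × List String) : Decidable (Spec_validate_referential_integrity data reference_data foreign_keys out) := by unfold Spec_validate_referential_integrity; infer_instance

-- ===== CLAIM (what is proved, stated in full; the proofs are below) =====
def Claim_equal_validate_referential_integrity : Prop := ∀ (data : List (List (String × String))) (reference_data : List (String × List (List (String × String)))) (foreign_keys : List (String × String)), Dom_validate_referential_integrity data reference_data foreign_keys → Spec_validate_referential_integrity data reference_data foreign_keys (validate_referential_integrity data reference_data foreign_keys)

-- ===== LEMMAS AND PROOFS =====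

-- the common closed form both programs are reduced to: the per-fk count …
def pvCnt (data : List (List (String × String))) (pk : List (String × PySem.Set String)) (fk : String × String) : Int :=
  match List.lookup fk.2 pk with
  | none => 0
  | some pks => (data.countP (fun row =>
      match List.lookup fk.1 row with
      | none => false
      | some v => !(PySem.Set.contains pks v)) : Nat)

-- … and the optional error of one foreign key
def pvErr (data : List (List (String × String))) (pk : List (String × PySem.Set String)) (fk : String × String) : Option String :=
  match List.lookup fk.2 pk with
  | none => some ("Reference table " ++ fk.2 ++ " not found")
  | some _ =>
      if pvCnt data pk fk > 0 then
        some ("Column " ++ fk.1 ++ " has " ++ PySem.Int.toStr (pvCnt data pk fk) ++ " invalid references to " ++ fk.2)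
      else none

-- lookup through a value-only map of an association list
lemma lookup_map_value {α β γ : Type} [BEq α] (k : α) (l : List (α × β)) (g : β → γ) :
    List.lookup k (l.map (fun p => (p.1, g p.2))) = (List.lookup k l).map g := by
  induction l with
  | nil => rfl
  | cons p t ih =>
      simp only [List.map_cons, List.lookup]
      cases h : k == p.1 <;> simp [ih]

-- A's counting fold equals a countP, from any start value
lemma count_eq (fk : String) (s : PySem.Set String) (data : List (List (String × String))) (n : Int) :
    data.foldl (fun n row =>
      match List.lookup fk row with
      | none => n
      | some v => if v ∈ s then n else n + 1) n
    = n + (data.countP (fun row =>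
        match List.lookup fk row with
        | none => false
        | some v => !(PySem.Set.contains s v)) : Nat) := by
  induction data generalizing n with
  | nil => simp
  | cons row t ih =>
      simp only [List.foldl_cons, List.countP_cons, ih]
      cases h : List.lookup fk row with
      | none => simp
      | some v =>
          by_cases hv : v ∈ s
          · simp [hv, PySem.Set.contains_eq_listContains]
          · simp [hv, PySem.Set.contains_eq_listContains]
            ring

-- a foldl that appends the optional result of each element is a filterMap
lemma foldl_append_opt {α β : Type} (f : α → Option β) (l : List α) (acc : List β) :
    l.foldl (fun es p => es ++ (f p).toList) acc = acc ++ l.filterMap f := by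
  induction l generalizing acc with
  | nil => simp
  | cons x t ih =>
      simp only [List.foldl_cons, List.filterMap_cons, ih]
      cases f x <;> simp

-- A's loop body equals appending the optional error pvErr
lemma stepA_eq (data : List (List (String × String))) (reference_data : List (String × List (List (String × String)))) (fk : String × String) (errors : List String) :
    (match List.lookup fk.2 reference_data with
     | none => errors ++ ["Reference table " ++ fk.2 ++ " not found"]
     | some refRows =>
        let ref_values : PySem.Set String := refRows.foldl (fun s ref_row =>
          match ref_row.map Prod.snd with
          | [] => s
          | v :: _ => PySem.Set.add s v) PySem.Set.empty
        let invalid_count : Int := data.foldl (fun n row =>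
          match List.lookup fk.1 row with
          | none => n
          | some v => if v ∈ ref_values then n else n + 1) 0
        if invalid_count > 0 then
          errors ++ ["Column " ++ fk.1 ++ " has " ++ PySem.Int.toStr invalid_count ++ " invalid references to " ++ fk.2]
        else errors)
    = errors ++ (pvErr data (reference_data.map (fun p => (p.1, pvPkSet p.2))) fk).toList := by
  rw [pvErr, pvCnt, lookup_map_value]
  cases h : List.lookup fk.2 reference_data with
  | none => simp
  | some refRows =>
      simp only [Option.map_some, pvPkSet, count_eq, zero_add]
      split <;> simp_all

-- so A's whole loop is the filterMap of pvErr
lemma A_eq (data : List (List (String × String))) (reference_data : List (String × List (List (String × String)))) (foreign_keys : List (String × String)) :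
    foreign_keys.foldl (fun (errors : List String) fk =>
      match List.lookup fk.2 reference_data with
      | none => errors ++ ["Reference table " ++ fk.2 ++ " not found"]
      | some refRows =>
          let ref_values : PySem.Set String := refRows.foldl (fun s ref_row =>
            match ref_row.map Prod.snd with
            | [] => s
            | v :: _ => PySem.Set.add s v) PySem.Set.empty
          let invalid_count : Int := data.foldl (fun n row =>
            match List.lookup fk.1 row with
            | none => n
            | some v => if v ∈ ref_values then n else n + 1) 0
          if invalid_count > 0 then
            errors ++ ["Column " ++ fk.1 ++ " has " ++ PySem.Int.toStr invalid_count ++ " invalid references to " ++ fk.2]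
          else errors) []
    = foreign_keys.filterMap (pvErr data (reference_data.map (fun p => (p.1, pvPkSet p.2)))) := by
  rw [List.foldl_ext _ (fun es (fk : String × String) => es ++ (pvErr data (reference_data.map (fun p => (p.1, pvPkSet p.2))) fk).toList) [] (fun es fk _ => stepA_eq data reference_data fk es), foldl_append_opt, List.nil_append]

-- one pvBump on a counter vector of shape items.map f shifts f pointwise
lemma bump_map (pk : List (String × PySem.Set String)) (row : List (String × String)) (items : List (String × String)) (f : String × String → Int) :
    pvBump pk items row (items.map f)
    = items.map (fun fk =>
        match List.lookup fk.2 pk with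
        | none => f fk
        | some pks =>
            match List.lookup fk.1 row with
            | none => f fk
            | some v => if PySem.Set.contains pks v then f fk else f fk + 1) := by
  induction items with
  | nil => rfl
  | cons x t ih => simp only [pvBump, List.map_cons, List.zipWith_cons_cons] at *; rw [ih]

-- B's data-major fold computes, per foreign key, A's per-key count
lemma counts_eq (pk : List (String × PySem.Set String)) (items : List (String × String)) (data : List (List (String × String))) (f : String × String → Int) :
    data.foldl (fun cs row => pvBump pk items row cs) (items.map f)
    = items.map (fun fk => f fk + pvCnt data pk fk) := by
  induction data generalizing f with
  | nil =>
      simp only [List.foldl_nil]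
      refine List.map_congr_left (fun fk _ => ?_)
      unfold pvCnt; cases List.lookup fk.2 pk <;> simp
  | cons row t ih =>
      simp only [List.foldl_cons, bump_map, ih]
      refine List.map_congr_left (fun fk _ => ?_)
      unfold pvCnt
      cases h2 : List.lookup fk.2 pk with
      | none => simp
      | some pks =>
          simp only [List.countP_cons]
          cases h1 : List.lookup fk.1 row with
          | none => simp
          | some v =>
              by_cases hv : v ∈ pks
              · simp [hv, PySem.Set.contains_eq_listContains]
              · simp [hv, PySem.Set.contains_eq_listContains]
                ring

-- zipping items with pointwise counts lets pvAssemble become the filterMap of pvErr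
lemma assemble_eq (data : List (List (String × String))) (pk : List (String × PySem.Set String)) (items : List (String × String)) :
    pvAssemble pk (items.zip (items.map (fun fk => pvCnt data pk fk)))
    = items.filterMap (pvErr data pk) := by
  have key : ∀ (its : List (String × String)) (acc : List String),
      (its.zip (its.map (fun fk => pvCnt data pk fk))).foldl (fun errors pc =>
        match List.lookup pc.1.2 pk with
        | none => errors ++ ["Reference table " ++ pc.1.2 ++ " not found"]
        | some _ =>
            if (pc.2 : Int) > 0 then
              errors ++ ["Column " ++ pc.1.1 ++ " has " ++ PySem.Int.toStr pc.2 ++ " invalid references to " ++ pc.1.2]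
            else errors) acc
      = acc ++ its.filterMap (pvErr data pk) := by
    intro its
    induction its with
    | nil => simp
    | cons x t ih =>
        intro acc
        simp only [List.map_cons, List.zip_cons_cons, List.foldl_cons, List.filterMap_cons]
        rw [ih]
        cases h : List.lookup x.2 pk with
        | none => simp [pvErr, h]
        | some pks =>
            simp only [pvErr, h]
            split_ifs with hc <;> simp
  unfold pvAssemble
  exact (key items []).trans (List.nil_append _)

-- ===== VERDICT (by name: the statement is the Claim_ definition above) =====
theorem validate_referential_integrity_spec : Claim_equal_validate_referential_integrity := by
  intro data reference_data foreign_keys _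
  show _ = _
  unfold validate_referential_integrity validate_referential_integrity_alt
  have hrep : List.replicate foreign_keys.length (0 : Int) = foreign_keys.map (fun _ => 0) := by
    simp
  simp only [A_eq, hrep, counts_eq, zero_add, assemble_eq]
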